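-- pv_equiv track=rewrite | github.com/Sapf3ar/sadm-misis-25 | task3/task.py | topo_sort_clusters
-- ===== SOURCE A (Python) =====
-- import heapq
--
-- def cluster_compare(left, right, rel, index):
--     saw_lr = False
--     saw_rl = False
--     for x in left:
--         ix = index[x]
--         for y in right:
--             iy = index[y]
--             if rel[ix][iy] == 1 and rel[iy][ix] == 0:
--                 saw_lr = True
--             elif rel[iy][ix] == 1 and rel[ix][iy] == 0:
--                 saw_rl = True
--             if saw_lr and saw_rl:
--                 return 0
--     if saw_lr and not saw_rl:
--         return 1
--     if saw_rl and not saw_lr: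
--         return -1
--     return 0
--
-- def topo_sort_clusters(groups, rel, index):
--     m = len(groups)
--     graph = [set() for _ in range(m)]
--     indeg = [0] * m
--
--     for i in range(m):
--         for j in range(i + 1, m):
--             cmpv = cluster_compare(groups[i], groups[j], rel, index)
--             if cmpv == 1:
--                 graph[i].add(j)
--             elif cmpv == -1:
--                 graph[j].add(i)
--
--     for u in range(m):
--         for v in graph[u]:
--             indeg[v] += 1
--
--     heap = []
--     for i in range(m):
--         if indeg[i] == 0:
--             heapq.heappush(heap, (groups[i][0], i))
--
--     order = []
--     while heap:
--         _, u = heapq.heappop(heap)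
--         order.append(u)
--         for v in graph[u]:
--             indeg[v] -= 1
--             if indeg[v] == 0:
--                 heapq.heappush(heap, (groups[v][0], v))
--
--     if len(order) != m:
--         order = sorted(range(m), key=lambda i: groups[i][0])
--
--     return [groups[i] for i in order]
-- ===== SOURCE B (Python) =====
-- def cluster_compare(left, right, rel, index):
--     saw_lr = False
--     saw_rl = False
--     for x in left:
--         ix = index[x]
--         for y in right:
--             iy = index[y]
--             if rel[ix][iy] == 1 and rel[iy][ix] == 0:
--                 saw_lr = True
--             elif rel[iy][ix] == 1 and rel[ix][iy] == 0:
--                 saw_rl = True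
--             if saw_lr and saw_rl:
--                 return 0
--     if saw_lr and not saw_rl:
--         return 1
--     if saw_rl and not saw_lr:
--         return -1
--     return 0
--
--
-- def topo_sort_clusters(groups, rel, index):
--     m = len(groups)
--
--     # flat edge list instead of adjacency sets
--     edges = []
--     for i in range(m):
--         for j in range(i + 1, m):
--             cmpv = cluster_compare(groups[i], groups[j], rel, index)
--             if cmpv == 1:
--                 edges.append((i, j))
--             elif cmpv == -1:
--                 edges.append((j, i))
--
--     indeg = [0] * m
--     for _, v in edges:
--         indeg[v] += 1
--
--     emitted = [False] * m
--     order = []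
--     while True:
--         best = None
--         for i in range(m):
--             if not emitted[i] and indeg[i] == 0 and (
--                 best is None or (groups[i][0], i) < (groups[best][0], best)
--             ):
--                 best = i
--         if best is None:
--             break
--         emitted[best] = True
--         order.append(best)
--         for u, v in edges:
--             if u == best:
--                 indeg[v] -= 1
--
--     if len(order) != m:
--         order = sorted(range(m), key=lambda i: groups[i][0])
--
--     return [groups[i] for i in order]
-- ===== Notes on version B (the rewrite author's own statement) =====
-- stated objective: alternative
-- what changed: B keeps cluster_compare but replaces A's adjacency-sets + separate indegree pass + heapq-based Kahn selection with a flat edge list, an indegree count over that list, and a repeated linear min-scan that picks the unemitted zero-indegree node minimizing (groups[i][0], i).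
import Mathlib
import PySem

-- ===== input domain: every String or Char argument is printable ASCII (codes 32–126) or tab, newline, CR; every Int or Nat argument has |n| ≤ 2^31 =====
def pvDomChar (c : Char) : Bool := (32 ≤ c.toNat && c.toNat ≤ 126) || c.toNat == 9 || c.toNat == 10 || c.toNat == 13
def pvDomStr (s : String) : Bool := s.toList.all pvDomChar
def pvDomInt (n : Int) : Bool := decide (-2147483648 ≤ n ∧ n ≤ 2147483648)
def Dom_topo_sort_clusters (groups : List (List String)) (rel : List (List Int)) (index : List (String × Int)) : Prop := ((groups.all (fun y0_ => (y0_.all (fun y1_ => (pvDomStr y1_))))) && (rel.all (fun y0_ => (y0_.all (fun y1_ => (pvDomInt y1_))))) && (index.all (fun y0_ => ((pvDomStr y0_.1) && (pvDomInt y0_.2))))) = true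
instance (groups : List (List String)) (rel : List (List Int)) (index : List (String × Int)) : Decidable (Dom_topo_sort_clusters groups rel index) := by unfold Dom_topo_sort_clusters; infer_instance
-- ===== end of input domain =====

-- B replaces A's adjacency-sets + heapq Kahn selection by a flat edge list and a repeated
-- linear min-scan over the zero-indegree unemitted nodes (objective: alternative; no speed claim).

-- ===== PORT A =====
-- shared helper, defined identically in Source A and Source B: index[x] (the key is always
-- present on Pre_ inputs, so getD's default is never used there)
def pvIdx (index : List (String × Int)) (x : String) : Int :=
  PySem.Dict.getD (PySem.Dict.mk index) x 0

-- rel[ix][iy]; both indexings are in range (possibly negative, Python wraparound) on Pre_ inputs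
def pvRel (rel : List (List Int)) (ix iy : Int) : Int :=
  PySem.List.pyGetD (PySem.List.pyGetD rel ix []) iy 0

-- inner 'for y in right' loop of cluster_compare; none = the early 'return 0'
def pvCCRight (rel : List (List Int)) (index : List (String × Int)) (ix : Int) :
    List String → Bool → Bool → Option (Bool × Bool)
  | [], sLR, sRL => some (sLR, sRL)
  | y :: ys, sLR, sRL =>
    let iy := pvIdx index y
    let sLR' := if pvRel rel ix iy = 1 ∧ pvRel rel iy ix = 0 then true else sLR
    let sRL' := if pvRel rel ix iy = 1 ∧ pvRel rel iy ix = 0 then sRL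
                else if pvRel rel iy ix = 1 ∧ pvRel rel ix iy = 0 then true else sRL
    if sLR' && sRL' then none else pvCCRight rel index ix ys sLR' sRL'

-- outer 'for x in left' loop of cluster_compare
def pvCCLeft (rel : List (List Int)) (index : List (String × Int)) (right : List String) :
    List String → Bool → Bool → Option (Bool × Bool)
  | [], sLR, sRL => some (sLR, sRL)
  | x :: xs, sLR, sRL =>
    match pvCCRight rel index (pvIdx index x) right sLR sRL with
    | none => none
    | some (sLR', sRL') => pvCCLeft rel index right xs sLR' sRL'

-- shared helper, defined identically in Source A and Source B
def cluster_compare (left right : List String) (rel : List (List Int)) (index : List (String × Int)) : Int :=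
  match pvCCLeft rel index right left false false with
  | none => 0
  | some (sLR, sRL) =>
    if sLR && !sRL then 1
    else if sRL && !sLR then -1
    else 0

-- the heap/scan key (groups[i][0], i)
def pvKey (groups : List (List String)) (i : Nat) : String × Nat :=
  ((groups.getD i []).headD "", i)

-- Python's lexicographic '<' on the (str, int) pairs compared here
def pvKeyLt (a b : String × Nat) : Bool :=
  decide (a.1 < b.1) || (a.1 == b.1 && decide (a.2 < b.2))

-- heapq.heappush: the heap is modelled as the multiset of its entries (heappop below
-- extracts its least element, which is exactly heapq's observable behaviour)
def pvPush (h : List (String × Nat)) (x : String × Nat) : List (String × Nat) := h ++ [x]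

-- the least entry of the nonempty heap x :: xs (unique here: second components differ)
def pvHeapMin (x : String × Nat) (xs : List (String × Nat)) : String × Nat :=
  xs.foldl (fun a b => if pvKeyLt b a then b else a) x

-- the 'while heap:' loop; fuel groups.length + 1 is enough: each node enters the heap at
-- most once (its indegree reaches 0 at most once), so there are at most m iterations
def pvLoopA (groups : List (List String)) (graph : List (List Nat)) :
    Nat → List (String × Nat) → List Int → List Nat → List Nat
  | 0, _, _, order => order
  | fuel + 1, heap, indeg, order =>
    match heap with
    | [] => order
    | x :: xs =>
      let mn := pvHeapMin x xs
      let u := mn.2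
      -- 'for v in graph[u]': decrement indeg[v], push v when it reaches 0
      -- (Python iterates the set in hash order; indeg updates commute and the heap is a
      -- multiset, so iterating in insertion order is observationally identical)
      let st := (graph.getD u []).foldl
        (fun (st : List (String × Nat) × List Int) v =>
          let d := st.2.set v (st.2.getD v 0 - 1)
          if d.getD v 0 = 0 then (pvPush st.1 (pvKey groups v), d) else (st.1, d))
        ((x :: xs).erase mn, indeg)
      pvLoopA groups graph fuel st.1 st.2 (order ++ [u])

def topo_sort_clusters (groups : List (List String)) (rel : List (List Int)) (index : List (String × Int)) : List (List String) :=
  let m := groups.length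
  -- graph = [set() for _ in range(m)], filled pair by pair (set.add = PySem.Set.add)
  let graph : List (List Nat) :=
    (List.range m).foldl (fun g i =>
      ((List.range m).drop (i + 1)).foldl (fun g j =>
        let c := cluster_compare (groups.getD i []) (groups.getD j []) rel index
        if c = 1 then g.set i (PySem.Set.add (g.getD i []) j)
        else if c = -1 then g.set j (PySem.Set.add (g.getD j []) i)
        else g) g)
      (List.replicate m ([] : List Nat))
  -- indeg pass over the finished graph
  let indeg : List Int :=
    (List.range m).foldl (fun d u =>
      (graph.getD u []).foldl (fun d v => d.set v (d.getD v 0 + 1)) d)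
      (List.replicate m (0 : Int))
  -- initial heap of indegree-0 nodes
  let heap0 : List (String × Nat) :=
    (List.range m).foldl (fun h i => if indeg.getD i 0 == 0 then pvPush h (pvKey groups i) else h) []
  let order := pvLoopA groups graph (m + 1) heap0 indeg []
  let order := if order.length ≠ m then PySem.List.sorted (List.range m) (fun i => (groups.getD i []).headD "") false else order
  order.map (fun i => groups.getD i [])

-- ===== PORT B =====
-- the inner 'for i in range(m)' min-scan of Source B (best is None ↦ none)
def pvScanBest (groups : List (List String)) (emitted : List Bool) (indeg : List Int) (m : Nat) : Option Nat :=
  (List.range m).foldl (fun best i =>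
    if (!emitted.getD i false) && (indeg.getD i 0 == 0) &&
        (match best with
         | none => true
         | some b => pvKeyLt (pvKey groups i) (pvKey groups b))
    then some i else best) none

-- the 'while True' selection loop of Source B; same fuel bound as pvLoopA
def pvLoopB (groups : List (List String)) (edges : List (Nat × Nat)) :
    Nat → List Bool → List Int → List Nat → List Nat
  | 0, _, _, order => order
  | fuel + 1, emitted, indeg, order =>
    match pvScanBest groups emitted indeg groups.length with
    | none => order
    | some u =>
      let emitted' := emitted.set u true
      let indeg' := edges.foldl (fun d e => if e.1 = u then d.set e.2 (d.getD e.2 0 - 1) else d) indeg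
      pvLoopB groups edges fuel emitted' indeg' (order ++ [u])

def topo_sort_clusters_alt (groups : List (List String)) (rel : List (List Int)) (index : List (String × Int)) : List (List String) :=
  let m := groups.length
  -- flat edge list
  let edges : List (Nat × Nat) :=
    (List.range m).foldl (fun es i =>
      ((List.range m).drop (i + 1)).foldl (fun es j =>
        let c := cluster_compare (groups.getD i []) (groups.getD j []) rel index
        if c = 1 then es ++ [(i, j)]
        else if c = -1 then es ++ [(j, i)]
        else es) es) []
  let indeg : List Int :=
    edges.foldl (fun d e => d.set e.2 (d.getD e.2 0 + 1)) (List.replicate m (0 : Int))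
  let order := pvLoopB groups edges (m + 1) (List.replicate m false) indeg []
  let order := if order.length ≠ m then PySem.List.sorted (List.range m) (fun i => (groups.getD i []).headD "") false else order
  order.map (fun i => groups.getD i [])

-- ===== PRECONDITION & SPEC =====
-- v is a valid (possibly negative, Python-wraparound) index into a list of length n
def pvInRange (n : Nat) (v : Int) : Bool :=
  decide (-(n : Int) ≤ v) && decide (v < (n : Int))

-- both strings resolve through index and both rel accesses rel[ix][iy], rel[iy][ix] are in range
def pvOkPair (rel : List (List Int)) (index : List (String × Int)) (x y : String) : Bool :=
  match PySem.Dict.get? (PySem.Dict.mk index) x, PySem.Dict.get? (PySem.Dict.mk index) y with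
  | some vx, some vy =>
      pvInRange rel.length vx && pvInRange rel.length vy &&
      pvInRange (PySem.List.pyGetD rel vx []).length vy &&
      pvInRange (PySem.List.pyGetD rel vy []).length vx
  | _, _ => false

-- A raises outside these inputs: IndexError on groups[i][0] for an empty cluster, KeyError on
-- index[x] for a string missing from index, IndexError on rel[ix][iy] out of range.  Slight
-- stated narrowing: Pre_ demands every lookup cluster_compare could make (every cross-cluster
-- string pair) be in range, although its early 'return 0' can skip some bad lookups on which
-- A still returns.
def Pre_topo_sort_clusters (groups : List (List String)) (rel : List (List Int)) (index : List (String × Int)) : Prop :=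
  (∀ g ∈ groups, g ≠ []) ∧
  (∀ i < groups.length, ∀ j < groups.length, i ≠ j →
    ∀ x ∈ groups.getD i [], ∀ y ∈ groups.getD j [], pvOkPair rel index x y = true)
instance (groups : List (List String)) (rel : List (List Int)) (index : List (String × Int)) : Decidable (Pre_topo_sort_clusters groups rel index) := by unfold Pre_topo_sort_clusters; infer_instance

def pvWitness_topo_sort_clusters : List (List String) × List (List Int) × (List (String × Int)) :=
  ([["a"], ["b"]], [[0, 1], [0, 0]], [("a", 0), ("b", 1)])

def Spec_topo_sort_clusters (groups : List (List String)) (rel : List (List Int)) (index : List (String × Int)) (out : List (List String)) : Prop := out = topo_sort_clusters_alt groups rel index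
instance (groups : List (List String)) (rel : List (List Int)) (index : List (String × Int)) (out : List (List String)) : Decidable (Spec_topo_sort_clusters groups rel index out) := by unfold Spec_topo_sort_clusters; infer_instance

-- ===== CLAIM (what is proved, stated in full; the proofs are below) =====
def Claim_equal_topo_sort_clusters : Prop := ∀ (groups : List (List String)) (rel : List (List Int)) (index : List (String × Int)), Dom_topo_sort_clusters groups rel index → Pre_topo_sort_clusters groups rel index → Spec_topo_sort_clusters groups rel index (topo_sort_clusters groups rel index)

-- ===== LEMMAS AND PROOFS =====

theorem pv_witness_ok :
    Dom_topo_sort_clusters pvWitness_topo_sort_clusters.1 pvWitness_topo_sort_clusters.2.1 pvWitness_topo_sort_clusters.2.2 ∧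
    Pre_topo_sort_clusters pvWitness_topo_sort_clusters.1 pvWitness_topo_sort_clusters.2.1 pvWitness_topo_sort_clusters.2.2 := by
  constructor <;> decide

-- ---- the strict lexicographic order on heap/scan keys ----

theorem pvKeyLt_iff (a b : String × Nat) :
    pvKeyLt a b = true ↔ (a.1 < b.1 ∨ (a.1 = b.1 ∧ a.2 < b.2)) := by
  simp [pvKeyLt]

theorem pvKeyLt_irrefl (a : String × Nat) : pvKeyLt a a = false := by
  simp [pvKeyLt]

theorem pvKeyLt_trans {a b c : String × Nat} (h1 : pvKeyLt a b = true)
    (h2 : pvKeyLt b c = true) : pvKeyLt a c = true := by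
  rw [pvKeyLt_iff] at *
  rcases h1 with h1 | ⟨h1e, h1n⟩ <;> rcases h2 with h2 | ⟨h2e, h2n⟩
  · exact Or.inl (lt_trans h1 h2)
  · exact Or.inl (h2e ▸ h1)
  · exact Or.inl (h1e ▸ h2)
  · exact Or.inr ⟨h1e.trans h2e, lt_trans h1n h2n⟩

theorem pvKeyLt_asymm {a b : String × Nat} (h : pvKeyLt a b = true) :
    pvKeyLt b a = false := by
  cases hba : pvKeyLt b a
  · rfl
  · have := pvKeyLt_trans h hba
    rw [pvKeyLt_irrefl] at this
    exact absurd this (by simp)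

theorem pvKeyLt_negtrans {a b c : String × Nat} (h1 : pvKeyLt a b = false)
    (h2 : pvKeyLt b c = false) : pvKeyLt a c = false := by
  rw [← Bool.not_eq_true] at h1 h2 ⊢
  rw [pvKeyLt_iff] at h1 h2 ⊢
  simp only [not_or, not_and, not_lt] at h1 h2 ⊢
  obtain ⟨hba, h1e⟩ := h1
  obtain ⟨hcb, h2e⟩ := h2
  refine ⟨hcb.trans hba, fun hac => ?_⟩
  have hab : a.1 = b.1 := le_antisymm (le_of_eq_of_le hac hcb) hba
  have := h1e hab
  have := h2e (hab ▸ hac)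
  omega

theorem pvKeyLt_antisymm_eq {a b : String × Nat} (h1 : pvKeyLt a b = false)
    (h2 : pvKeyLt b a = false) : a = b := by
  rw [← Bool.not_eq_true] at h1 h2
  rw [pvKeyLt_iff] at h1 h2
  simp only [not_or, not_and, not_lt] at h1 h2
  have he : a.1 = b.1 := le_antisymm h2.1 h1.1
  have h12 := h1.2 he
  have h21 := h2.2 he.symm
  exact Prod.ext he (le_antisymm h21 h12)

theorem pvKey_inj (groups : List (List String)) : Function.Injective (pvKey groups) := by
  intro i j h
  have := congrArg Prod.snd h
  simpa [pvKey] using this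

-- ---- the heap minimum and the linear scan pick the same element ----

theorem pvHeapMin_cons (x y : String × Nat) (ys : List (String × Nat)) :
    pvHeapMin x (y :: ys) = pvHeapMin (if pvKeyLt y x then y else x) ys := rfl

theorem pvHeapMin_mem : ∀ (xs : List (String × Nat)) (x : String × Nat),
    pvHeapMin x xs ∈ x :: xs := by
  intro xs
  induction xs with
  | nil => intro x; simp [pvHeapMin]
  | cons y ys ih =>
    intro x
    rw [pvHeapMin_cons]
    have := ih (if pvKeyLt y x then y else x)
    rcases List.mem_cons.mp this with h | h
    · rw [h]; split <;> simp
    · simp [h]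

theorem pvHeapMin_not_lt : ∀ (xs : List (String × Nat)) (x p : String × Nat),
    p ∈ x :: xs → pvKeyLt p (pvHeapMin x xs) = false := by
  intro xs
  induction xs with
  | nil =>
    intro x p hp
    simp at hp
    simp [hp, pvHeapMin, pvKeyLt_irrefl]
  | cons y ys ih =>
    intro x p hp
    rw [pvHeapMin_cons]
    set z := if pvKeyLt y x then y else x with hz
    have hxz : pvKeyLt x z = false := by
      by_cases h : pvKeyLt y x = true
      · simp [hz, h]; exact pvKeyLt_asymm h
      · simp at h; simp [hz, h, pvKeyLt_irrefl]
    have hyz : pvKeyLt y z = false := by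
      by_cases h : pvKeyLt y x = true
      · simp [hz, h, pvKeyLt_irrefl]
      · simp at h; simp [hz, h]
    have hz_min : pvKeyLt z (pvHeapMin z ys) = false :=
      ih z z (List.mem_cons_self)
    rcases List.mem_cons.mp hp with rfl | hp'
    · exact pvKeyLt_negtrans hxz hz_min
    · rcases List.mem_cons.mp hp' with rfl | hp''
      · exact pvKeyLt_negtrans hyz hz_min
      · exact ih z p (List.mem_cons_of_mem z hp'')

-- the candidate test of Source B's scan: not yet emitted and of indegree 0
def pvCond (emitted : List Bool) (indeg : List Int) (i : Nat) : Bool :=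
  (!emitted.getD i false) && (indeg.getD i 0 == 0)

-- Source B's scan step
def pvStep (groups : List (List String)) (emitted : List Bool) (indeg : List Int) :
    Option Nat → Nat → Option Nat := fun best i =>
  if pvCond emitted indeg i &&
      (match best with
       | none => true
       | some b => pvKeyLt (pvKey groups i) (pvKey groups b))
  then some i else best

theorem pvScanBest_eq (groups : List (List String)) (emitted : List Bool) (indeg : List Int)
    (m : Nat) :
    pvScanBest groups emitted indeg m = (List.range m).foldl (pvStep groups emitted indeg) none := by
  rfl

theorem pv_scan_none_inv (groups : List (List String)) (emitted : List Bool) (indeg : List Int) :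
    ∀ (l : List Nat) (acc : Option Nat),
      l.foldl (pvStep groups emitted indeg) acc = none →
      acc = none ∧ ∀ i ∈ l, pvCond emitted indeg i = false := by
  intro l
  induction l with
  | nil => intro acc h; simpa using h
  | cons i0 t ih =>
    intro acc h
    rw [List.foldl_cons] at h
    obtain ⟨hacc', hrest⟩ := ih _ h
    have hc : pvCond emitted indeg i0 = false := by
      cases hc : pvCond emitted indeg i0
      · rfl
      · exfalso
        cases acc with
        | none => simp [pvStep, hc] at hacc'
        | some b => simp [pvStep, hc] at hacc'; split at hacc' <;> simp_all
    have : pvStep groups emitted indeg acc i0 = acc := by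
      simp [pvStep, hc]
    rw [this] at hacc'
    exact ⟨hacc', by intro i hi; rcases List.mem_cons.mp hi with rfl | h' <;>
      [exact hc; exact hrest i h']⟩

theorem pv_scan_some_inv (groups : List (List String)) (emitted : List Bool) (indeg : List Int) :
    ∀ (l : List Nat) (acc : Option Nat) (b : Nat),
      l.foldl (pvStep groups emitted indeg) acc = some b →
      (b ∈ l ∧ pvCond emitted indeg b = true) ∨ acc = some b := by
  intro l
  induction l with
  | nil => intro acc b h; right; simpa using h
  | cons i0 t ih =>
    intro acc b h
    rw [List.foldl_cons] at h
    rcases ih _ _ h with ⟨hb, hc⟩ | hacc'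
    · exact Or.inl ⟨List.mem_cons_of_mem _ hb, hc⟩
    · cases acc with
      | none =>
        cases hc0 : pvCond emitted indeg i0
        · have hstep : pvStep groups emitted indeg none i0 = none := by
            simp only [pvStep]; rw [if_neg (by simp [hc0])]
          rw [hstep] at hacc'
          exact absurd hacc' (by simp)
        · have hstep : pvStep groups emitted indeg none i0 = some i0 := by
            simp only [pvStep]; rw [if_pos (by simp [hc0])]
          rw [hstep] at hacc'
          obtain rfl := Option.some.inj hacc'
          exact Or.inl ⟨List.mem_cons_self, hc0⟩
      | some b0 =>
        by_cases hcnd : (pvCond emitted indeg i0 && pvKeyLt (pvKey groups i0) (pvKey groups b0)) = true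
        · have hstep : pvStep groups emitted indeg (some b0) i0 = some i0 := by
            simp only [pvStep]; rw [if_pos hcnd]
          rw [hstep] at hacc'
          obtain rfl := Option.some.inj hacc'
          rw [Bool.and_eq_true] at hcnd
          exact Or.inl ⟨List.mem_cons_self, hcnd.1⟩
        · have hstep : pvStep groups emitted indeg (some b0) i0 = some b0 := by
            simp only [pvStep]; rw [if_neg hcnd]
          rw [hstep] at hacc'
          exact Or.inr hacc'

theorem pv_scan_le_acc (groups : List (List String)) (emitted : List Bool) (indeg : List Int) :
    ∀ (l : List Nat) (acc : Option Nat) (b b0 : Nat),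
      l.foldl (pvStep groups emitted indeg) acc = some b →
      acc = some b0 →
      pvKeyLt (pvKey groups b0) (pvKey groups b) = false := by
  intro l
  induction l with
  | nil =>
    intro acc b b0 h h0
    rw [h0] at h; simp at h
    simp [h, pvKeyLt_irrefl]
  | cons i0 t ih =>
    intro acc b b0 h h0
    rw [List.foldl_cons] at h
    subst h0
    by_cases hcnd : (pvCond emitted indeg i0 && pvKeyLt (pvKey groups i0) (pvKey groups b0)) = true
    · have hstep : pvStep groups emitted indeg (some b0) i0 = some i0 := by
        simp only [pvStep]; rw [if_pos hcnd]
      rw [hstep] at h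
      rw [Bool.and_eq_true] at hcnd
      have h1 : pvKeyLt (pvKey groups i0) (pvKey groups b) = false := ih _ _ _ h rfl
      cases hkb : pvKeyLt (pvKey groups b0) (pvKey groups b)
      · rfl
      · exact absurd (pvKeyLt_trans hcnd.2 hkb) (by simp [h1])
    · have hstep : pvStep groups emitted indeg (some b0) i0 = some b0 := by
        simp only [pvStep]; rw [if_neg hcnd]
      rw [hstep] at h
      exact ih _ _ _ h rfl

theorem pv_scan_min (groups : List (List String)) (emitted : List Bool) (indeg : List Int) :
    ∀ (l : List Nat) (acc : Option Nat) (b : Nat),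
      l.foldl (pvStep groups emitted indeg) acc = some b →
      ∀ i ∈ l, pvCond emitted indeg i = true →
        pvKeyLt (pvKey groups i) (pvKey groups b) = false := by
  intro l
  induction l with
  | nil => intro acc b _ i hi; simp at hi
  | cons i0 t ih =>
    intro acc b h i hi hc
    rw [List.foldl_cons] at h
    rcases List.mem_cons.mp hi with rfl | hit
    · cases acc with
      | none =>
        have hstep : pvStep groups emitted indeg none i = some i := by
          simp only [pvStep]; rw [if_pos (by simp [hc])]
        rw [hstep] at h
        exact pv_scan_le_acc groups emitted indeg t _ b i h rfl
      | some b0 =>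
        cases hlt : pvKeyLt (pvKey groups i) (pvKey groups b0)
        · have hstep : pvStep groups emitted indeg (some b0) i = some b0 := by
            simp only [pvStep]; rw [if_neg (by simp [hlt])]
          rw [hstep] at h
          have hb0 : pvKeyLt (pvKey groups b0) (pvKey groups b) = false :=
            pv_scan_le_acc groups emitted indeg t _ b b0 h rfl
          exact pvKeyLt_negtrans hlt hb0
        · have hstep : pvStep groups emitted indeg (some b0) i = some i := by
            simp only [pvStep]; rw [if_pos (by simp [hc, hlt])]
          rw [hstep] at h
          exact pv_scan_le_acc groups emitted indeg t _ b i h rfl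
    · exact ih _ _ h i hit hc

-- on a heap that mirrors the candidate set, heappop's minimum is the scan's choice
theorem pv_bridge (groups : List (List String)) (emitted : List Bool) (indeg : List Int)
    (x : String × Nat) (xs : List (String × Nat))
    (hmem : ∀ i, i < groups.length →
      ((pvKey groups i ∈ x :: xs) ↔ (emitted.getD i false = false ∧ indeg.getD i 0 = 0)))
    (hform : ∀ p ∈ x :: xs, ∃ i, i < groups.length ∧ p = pvKey groups i) :
    pvScanBest groups emitted indeg groups.length = some (pvHeapMin x xs).2 ∧
    pvHeapMin x xs = pvKey groups (pvHeapMin x xs).2 := by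
  obtain ⟨u, hu, hmn⟩ := hform _ (pvHeapMin_mem xs x)
  have h2nd : (pvHeapMin x xs).2 = u := by rw [hmn]; rfl
  have humem : pvKey groups u ∈ x :: xs := hmn ▸ pvHeapMin_mem xs x
  obtain ⟨he1, he2⟩ := (hmem u hu).mp humem
  have hcu : pvCond emitted indeg u = true := by
    simp only [pvCond, Bool.and_eq_true, Bool.not_eq_true', beq_iff_eq]
    exact ⟨he1, he2⟩
  rw [pvScanBest_eq]
  cases hscan : (List.range groups.length).foldl (pvStep groups emitted indeg) none with
  | none =>
    exfalso
    have := (pv_scan_none_inv groups emitted indeg _ _ hscan).2 u (List.mem_range.mpr hu)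
    simp [this] at hcu
  | some b =>
    rcases pv_scan_some_inv groups emitted indeg _ _ _ hscan with ⟨hbr, hcb⟩ | h
    · have hb : b < groups.length := List.mem_range.mp hbr
      have hkb : pvKey groups b ∈ x :: xs := by
        apply (hmem b hb).mpr
        simp only [pvCond, Bool.and_eq_true, Bool.not_eq_true', beq_iff_eq] at hcb
        exact hcb
      have h1 : pvKeyLt (pvKey groups b) (pvHeapMin x xs) = false :=
        pvHeapMin_not_lt xs x _ hkb
      have h2 : pvKeyLt (pvKey groups u) (pvKey groups b) = false :=
        pv_scan_min groups emitted indeg _ _ _ hscan u (List.mem_range.mpr hu) hcu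
      rw [hmn] at h1
      have hub : u = b := pvKey_inj groups (pvKeyLt_antisymm_eq h2 h1)
      subst hub
      exact ⟨by rw [h2nd], by rw [h2nd]; exact hmn⟩
    · simp at h

-- ---- indexed-list update helpers ----

theorem pv_getD_set_self {α : Type} (d : List α) (v : Nat) (a x : α) (h : v < d.length) :
    (d.set v a).getD v x = a := by
  simp [List.getD_eq_getElem?_getD, h]

theorem pv_getD_set_ne {α : Type} (d : List α) (v w : Nat) (a x : α) (h : v ≠ w) :
    (d.set v a).getD w x = d.getD w x := by
  simp [List.getD_eq_getElem?_getD, List.getElem?_set, h]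

theorem pv_foldl_set_length {α β : Type} (g : List α → β → α) :
    ∀ (row : List β) (pos : β → Nat) (d : List α),
      (row.foldl (fun d v => d.set (pos v) (g d v)) d).length = d.length := by
  intro row
  induction row with
  | nil => intro pos d; rfl
  | cons v t ih => intro pos d; rw [List.foldl_cons, ih]; simp

-- ---- the decrement loop: pointwise effect on indeg ----

theorem pv_decFold_getD :
    ∀ (row : List Nat) (d : List Int) (i : Nat), row.Nodup → (∀ v ∈ row, v < d.length) →
      (row.foldl (fun d v => d.set v (d.getD v 0 - 1)) d).getD i 0 =
        if i ∈ row then d.getD i 0 - 1 else d.getD i 0 := by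
  intro row
  induction row with
  | nil => intro d i _ _; simp
  | cons v t ih =>
    intro d i hnd hlt
    rw [List.foldl_cons]
    have hvd : v < d.length := hlt v List.mem_cons_self
    have ht : ∀ w ∈ t, w < (d.set v (d.getD v 0 - 1)).length := by
      intro w hw; simpa using hlt w (List.mem_cons_of_mem v hw)
    rw [ih _ i (List.Nodup.of_cons hnd) ht]
    by_cases hit : i ∈ t
    · have hiv : i ≠ v := fun h => (List.nodup_cons.mp hnd).1 (h ▸ hit)
      rw [pv_getD_set_ne d v i _ 0 (fun h => hiv h.symm)]
      simp [hit, hiv]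
    · by_cases hiv : i = v
      · subst hiv
        rw [pv_getD_set_self d i _ 0 hvd]
        simp [hit]
      · rw [pv_getD_set_ne d v i _ 0 (fun h => hiv h.symm)]
        simp [hit, hiv]

-- ---- the increment loops: indeg counts incoming edges ----

theorem pv_incFold_getD :
    ∀ (row : List Nat) (d : List Int) (i : Nat), (∀ v ∈ row, v < d.length) →
      (row.foldl (fun d v => d.set v (d.getD v 0 + 1)) d).getD i 0 =
        d.getD i 0 + ((row.filter (fun v => v == i)).length : Int) := by
  intro row
  induction row with
  | nil => intro d i _; simp
  | cons v t ih =>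
    intro d i hlt
    rw [List.foldl_cons]
    have hvd : v < d.length := hlt v List.mem_cons_self
    have ht : ∀ w ∈ t, w < (d.set v (d.getD v 0 + 1)).length := by
      intro w hw; simpa using hlt w (List.mem_cons_of_mem v hw)
    rw [ih _ i ht]
    by_cases hiv : v = i
    · subst hiv
      rw [pv_getD_set_self d v _ 0 hvd]
      simp [List.filter_cons]
      omega
    · rw [pv_getD_set_ne d v i _ 0 hiv]
      simp [List.filter_cons, hiv]

theorem pv_edgeIncFold_getD :
    ∀ (es : List (Nat × Nat)) (d : List Int) (i : Nat), (∀ e ∈ es, e.2 < d.length) →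
      (es.foldl (fun d e => d.set e.2 (d.getD e.2 0 + 1)) d).getD i 0 =
        d.getD i 0 + ((es.filter (fun e => e.2 == i)).length : Int) := by
  intro es
  induction es with
  | nil => intro d i _; simp
  | cons e t ih =>
    intro d i hlt
    rw [List.foldl_cons]
    have hed : e.2 < d.length := hlt e List.mem_cons_self
    have ht : ∀ w ∈ t, w.2 < (d.set e.2 (d.getD e.2 0 + 1)).length := by
      intro w hw; simpa using hlt w (List.mem_cons_of_mem e hw)
    rw [ih _ i ht]
    by_cases hiv : e.2 = i
    · rw [hiv, pv_getD_set_self d i _ 0 (hiv ▸ hed)]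
      simp [List.filter_cons, hiv]
      omega
    · rw [pv_getD_set_ne d e.2 i _ 0 hiv]
      simp [List.filter_cons, hiv]

theorem pv_nestedInc_getD (row : Nat → List Nat) :
    ∀ (us : List Nat) (d : List Int) (i : Nat),
      (∀ u ∈ us, ∀ v ∈ row u, v < d.length) →
      ((us.foldl (fun d u => (row u).foldl (fun d v => d.set v (d.getD v 0 + 1)) d) d).getD i 0)
        = d.getD i 0 + ((us.map (fun u => ((row u).filter (fun v => v == i)).length)).sum : Int) := by
  intro us
  induction us with
  | nil => intro d i _; simp
  | cons u t ih =>
    intro d i hlt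
    rw [List.foldl_cons]
    have hlen : ((row u).foldl (fun d v => d.set v (d.getD v 0 + 1)) d).length = d.length :=
      pv_foldl_set_length (fun d v => d.getD v 0 + 1) (row u) id d
    have ht : ∀ u' ∈ t, ∀ v ∈ row u', v < ((row u).foldl (fun d v => d.set v (d.getD v 0 + 1)) d).length := by
      intro u' hu' v hv; rw [hlen]; exact hlt u' (List.mem_cons_of_mem u hu') v hv
    rw [ih _ i ht, pv_incFold_getD (row u) d i (hlt u List.mem_cons_self)]
    simp
    omega

-- ---- A's combined decrement-and-push loop, split into its two effects ----

theorem pv_stepA_fold (groups : List (List String)) :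
    ∀ (row : List Nat) (h : List (String × Nat)) (d : List Int),
      row.Nodup → (∀ v ∈ row, v < d.length) →
      (row.foldl (fun (st : List (String × Nat) × List Int) v =>
          let d' := st.2.set v (st.2.getD v 0 - 1)
          if d'.getD v 0 = 0 then (pvPush st.1 (pvKey groups v), d') else (st.1, d')) (h, d))
        = (h ++ ((row.filter (fun v => d.getD v 0 == 1)).map (pvKey groups)),
           row.foldl (fun d v => d.set v (d.getD v 0 - 1)) d) := by
  intro row
  induction row with
  | nil => intro h d _ _; simp
  | cons v t ih =>
    intro h d hnd hlt
    have hvd : v < d.length := hlt v List.mem_cons_self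
    have hvt : v ∉ t := (List.nodup_cons.mp hnd).1
    have hd1v : (d.set v (d.getD v 0 - 1)).getD v 0 = d.getD v 0 - 1 :=
      pv_getD_set_self d v _ 0 hvd
    have hlt' : ∀ w ∈ t, w < (d.set v (d.getD v 0 - 1)).length := by
      intro w hw; simpa using hlt w (List.mem_cons_of_mem v hw)
    have hfc : (t.filter (fun w => (d.set v (d.getD v 0 - 1)).getD w 0 == 1))
        = t.filter (fun w => d.getD w 0 == 1) := by
      apply List.filter_congr
      intro w hw
      rw [pv_getD_set_ne d v w _ 0 (fun hvw => hvt (hvw ▸ hw))]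
    simp only [List.foldl_cons]
    by_cases hc : d.getD v 0 = 1
    · rw [if_pos (by rw [hd1v]; omega)]
      rw [ih _ _ (List.Nodup.of_cons hnd) hlt', hfc]
      simp [pvPush, show d[v]?.getD 0 = 1 from hc]
    · rw [if_neg (by rw [hd1v]; omega)]
      rw [ih _ _ (List.Nodup.of_cons hnd) hlt', hfc]
      simp [show ¬(d[v]?.getD 0 = 1) from hc]

-- ---- B's guarded decrement over the edge list is A's decrement over graph[u] ----

theorem pv_guardFold_filter (u : Nat) :
    ∀ (es : List (Nat × Nat)) (d : List Int),
      es.foldl (fun d e => if e.1 = u then d.set e.2 (d.getD e.2 0 - 1) else d) d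
        = ((es.filter (fun e => e.1 == u)).map (fun e => e.2)).foldl
            (fun d v => d.set v (d.getD v 0 - 1)) d := by
  intro es
  induction es with
  | nil => intro d; rfl
  | cons e t ih =>
    intro d
    rw [List.foldl_cons]
    by_cases he : e.1 = u
    · rw [if_pos he]
      simpa [List.filter_cons, he] using ih (d.set e.2 (d.getD e.2 0 - 1))
    · rw [if_neg he]
      simpa [List.filter_cons, he] using ih d

-- ---- counting lemmas for the indegree invariant ----

theorem pv_filterLen_split (p p' q : (Nat × Nat) → Bool) :
    ∀ (es : List (Nat × Nat)),
      (∀ e ∈ es, p e = (p' e || q e) ∧ ¬(p' e = true ∧ q e = true)) →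
      (es.filter p).length = (es.filter p').length + (es.filter q).length := by
  intro es
  induction es with
  | nil => intro _; rfl
  | cons e t ih =>
    intro hp
    have he := hp e List.mem_cons_self
    have ht := fun e' he' => hp e' (List.mem_cons_of_mem e he')
    simp only [List.filter_cons]
    rw [he.1]
    cases hp' : p' e <;> cases hq : q e <;>
      simp_all [ih ht] <;> omega

theorem pv_sum_indicator {c : Nat} (u : Nat) :
    ∀ (l : List Nat), l.Nodup → u ∈ l →
      (l.map (fun x => if x = u then c else 0)).sum = c := by
  intro l
  induction l with
  | nil => intro _ h; simp at h
  | cons x t ih =>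
    intro hnd hu
    rcases List.mem_cons.mp hu with heq | hut
    · have hz : ∀ y ∈ t, (if y = u then c else 0) = 0 := by
        intro y hy
        have : y ≠ u := fun h => (List.nodup_cons.mp hnd).1 (heq ▸ h ▸ hy)
        simp [this]
      have h1 : (List.map (fun y => if y = u then c else 0) t) = List.map (fun _ => 0) t :=
        List.map_congr_left hz
      rw [List.map_cons, h1, if_pos heq.symm]
      simp
    · have hxu : x ≠ u := fun h => (List.nodup_cons.mp hnd).1 (h ▸ hut)
      simp [hxu, ih (List.Nodup.of_cons hnd) hut]

theorem pv_sum_rows_filter (m i : Nat) :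
    ∀ (es : List (Nat × Nat)), (∀ e ∈ es, e.1 < m) →
      ((List.range m).map (fun u =>
          ((((es.filter (fun e => e.1 == u)).map (fun e => e.2)).filter (fun v => v == i)).length))).sum
        = (es.filter (fun e => e.2 == i)).length := by
  intro es
  induction es with
  | nil => intro _; simp
  | cons e t ih =>
    intro hlt
    have hem : e.1 < m := hlt e List.mem_cons_self
    have ht := fun e' he' => hlt e' (List.mem_cons_of_mem e he')
    have hrow : ∀ u, (((((e :: t).filter (fun e => e.1 == u)).map (fun e => e.2)).filter (fun v => v == i)).length)
        = ((((t.filter (fun e => e.1 == u)).map (fun e => e.2)).filter (fun v => v == i)).length)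
          + (if u = e.1 then (if (e.2 == i) then 1 else 0) else 0) := by
      intro u
      by_cases hu : e.1 = u
      · simp only [List.filter_cons, hu, beq_self_eq_true, if_pos]
        simp only [List.map_cons, List.filter_cons]
        cases h2 : (e.2 == i) <;> simp [hu.symm]
      · have : (e.1 == u) = false := by simpa using hu
        simp only [List.filter_cons, this]
        have : u ≠ e.1 := fun h => hu h.symm
        simp [this]
    rw [List.map_congr_left (fun u _ => hrow u)]
    rw [List.sum_map_add]
    rw [ih ht]
    have hind : ((List.range m).map (fun u => if u = e.1 then (if (e.2 == i) then 1 else 0) else 0)).sum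
        = (if (e.2 == i) then 1 else 0) :=
      pv_sum_indicator e.1 (List.range m) (List.nodup_range) (List.mem_range.mpr hem)
    rw [hind, List.filter_cons]
    cases h2 : (e.2 == i) <;> simp

-- ---- the two pair-by-pair constructions stay in lockstep ----

-- one step of A's graph construction
def pvStepG (groups : List (List String)) (rel : List (List Int)) (index : List (String × Int))
    (g : List (List Nat)) (p : Nat × Nat) : List (List Nat) :=
  let c := cluster_compare (groups.getD p.1 []) (groups.getD p.2 []) rel index
  if c = 1 then g.set p.1 (PySem.Set.add (g.getD p.1 []) p.2)
  else if c = -1 then g.set p.2 (PySem.Set.add (g.getD p.2 []) p.1)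
  else g

-- one step of B's edge-list construction
def pvStepE (groups : List (List String)) (rel : List (List Int)) (index : List (String × Int))
    (es : List (Nat × Nat)) (p : Nat × Nat) : List (Nat × Nat) :=
  let c := cluster_compare (groups.getD p.1 []) (groups.getD p.2 []) rel index
  if c = 1 then es ++ [(p.1, p.2)]
  else if c = -1 then es ++ [(p.2, p.1)]
  else es

-- the (i, j), i < j < m pairs both nested loops enumerate
def pvPairs (m : Nat) : List (Nat × Nat) :=
  (List.range m).flatMap (fun i => ((List.range m).drop (i + 1)).map (fun j => (i, j)))

theorem pv_graph_conv (groups : List (List String)) (rel : List (List Int))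
    (index : List (String × Int)) (m : Nat) (g0 : List (List Nat)) :
    (List.range m).foldl (fun g i =>
      ((List.range m).drop (i + 1)).foldl (fun g j =>
        let c := cluster_compare (groups.getD i []) (groups.getD j []) rel index
        if c = 1 then g.set i (PySem.Set.add (g.getD i []) j)
        else if c = -1 then g.set j (PySem.Set.add (g.getD j []) i)
        else g) g) g0
    = (pvPairs m).foldl (pvStepG groups rel index) g0 := by
  rw [pvPairs, List.foldl_flatMap]
  simp only [List.foldl_map]
  rfl

theorem pv_edges_conv (groups : List (List String)) (rel : List (List Int))
    (index : List (String × Int)) (m : Nat) (es0 : List (Nat × Nat)) :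
    (List.range m).foldl (fun es i =>
      ((List.range m).drop (i + 1)).foldl (fun es j =>
        let c := cluster_compare (groups.getD i []) (groups.getD j []) rel index
        if c = 1 then es ++ [(i, j)]
        else if c = -1 then es ++ [(j, i)]
        else es) es) es0
    = (pvPairs m).foldl (pvStepE groups rel index) es0 := by
  rw [pvPairs, List.foldl_flatMap]
  simp only [List.foldl_map]
  rfl

theorem pv_pairs_mem {m : Nat} {p : Nat × Nat} (hp : p ∈ pvPairs m) : p.1 < p.2 ∧ p.2 < m := by
  simp only [pvPairs, List.mem_flatMap, List.mem_map] at hp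
  obtain ⟨i, hi, j, hj, rfl⟩ := hp
  rw [List.range_eq_range', List.drop_range'] at hj
  rw [List.mem_range'] at hj
  simp only []
  omega

theorem pv_pairs_nodup (m : Nat) : (pvPairs m).Nodup := by
  rw [pvPairs, List.nodup_flatMap]
  constructor
  · intro i _
    exact ((List.nodup_range).sublist (List.drop_sublist _ _)).map
      (fun j j' h => by simpa using h)
  · refine (List.pairwise_lt_range).imp ?_
    intro i1 i2 hlt
    rw [Function.onFun, List.disjoint_left]
    intro a ha1 ha2
    obtain ⟨j1, _, rfl⟩ := List.mem_map.mp ha1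
    obtain ⟨j2, _, h⟩ := List.mem_map.mp ha2
    have := congrArg Prod.fst h
    simp at this
    omega

theorem pv_pairs_pairwise (m : Nat) :
    (pvPairs m).Pairwise (fun p q => ¬(q = p ∨ q = (p.2, p.1))) := by
  refine List.Pairwise.imp_of_mem ?_ (pv_pairs_nodup m)
  intro p q hp hq hne
  rintro (rfl | hswap)
  · exact hne rfl
  · have h1 := pv_pairs_mem hp
    have h2 := pv_pairs_mem hq
    have e1 := congrArg Prod.fst hswap
    have e2 := congrArg Prod.snd hswap
    simp at e1 e2
    omega

theorem pv_build_sync (groups : List (List String)) (rel : List (List Int))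
    (index : List (String × Int)) (m : Nat) :
    ∀ (ps es : List (Nat × Nat)) (g : List (List Nat)),
      g.length = m →
      (∀ p ∈ ps, p.1 < m ∧ p.2 < m ∧ p.1 ≠ p.2) →
      (∀ e ∈ es, e.1 < m ∧ e.2 < m ∧ e.1 ≠ e.2) →
      (∀ p ∈ ps, ∀ e ∈ es, ¬(e = p ∨ e = (p.2, p.1))) →
      ps.Pairwise (fun p q => ¬(q = p ∨ q = (p.2, p.1))) →
      es.Nodup →
      (∀ u, g.getD u [] = (es.filter (fun e => e.1 == u)).map (fun e => e.2)) →
      (ps.foldl (pvStepG groups rel index) g).length = m ∧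
      (∀ e ∈ ps.foldl (pvStepE groups rel index) es, e.1 < m ∧ e.2 < m ∧ e.1 ≠ e.2) ∧
      (ps.foldl (pvStepE groups rel index) es).Nodup ∧
      (∀ u, (ps.foldl (pvStepG groups rel index) g).getD u [] =
        ((ps.foldl (pvStepE groups rel index) es).filter (fun e => e.1 == u)).map (fun e => e.2)) := by
  intro ps
  induction ps with
  | nil =>
    intro es g hg _ hes _ _ hnd hrow
    exact ⟨hg, hes, hnd, hrow⟩
  | cons p t ih =>
    intro es g hg hps hes hfresh hpw hnd hrow
    rw [List.foldl_cons, List.foldl_cons]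
    obtain ⟨hp1, hp2, hpne⟩ := hps p List.mem_cons_self
    have hps' := fun q hq => hps q (List.mem_cons_of_mem p hq)
    have hpw' := (List.pairwise_cons.mp hpw).2
    have hpwh := (List.pairwise_cons.mp hpw).1
    -- one generic continuation for an added edge e' = (a, b) with {a, b} = {p.1, p.2}
    have hcont : ∀ (a b : Nat), a < m → b < m → a ≠ b →
        ((a, b) = p ∨ (a, b) = (p.2, p.1)) →
        pvStepG groups rel index g p = g.set a (PySem.Set.add (g.getD a []) b) →
        pvStepE groups rel index es p = es ++ [(a, b)] →
        (List.foldl (pvStepG groups rel index) (pvStepG groups rel index g p) t).length = m ∧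
        (∀ e ∈ List.foldl (pvStepE groups rel index) (pvStepE groups rel index es p) t,
          e.1 < m ∧ e.2 < m ∧ e.1 ≠ e.2) ∧
        (List.foldl (pvStepE groups rel index) (pvStepE groups rel index es p) t).Nodup ∧
        (∀ u, (List.foldl (pvStepG groups rel index) (pvStepG groups rel index g p) t).getD u [] =
          ((List.foldl (pvStepE groups rel index) (pvStepE groups rel index es p) t).filter
            (fun e => e.1 == u)).map (fun e => e.2)) := by
      intro a b ha hb hab hform hG hE
      have hnotin : (a, b) ∉ es := by
        intro hmem
        exact hfresh p List.mem_cons_self (a, b) hmem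
          (by rcases hform with h | h
              · exact Or.inl h
              · right
                have := congrArg Prod.fst h
                have := congrArg Prod.snd h
                simp_all)
      have hnotrow : b ∉ g.getD a [] := by
        rw [hrow a]
        intro hmem
        obtain ⟨e, hemem, he2⟩ := List.mem_map.mp hmem
        have he1 : e.1 = a := by
          have := List.mem_filter.mp hemem
          simpa using this.2
        exact hnotin (by
          have : e = (a, b) := Prod.ext he1 he2
          exact this ▸ (List.mem_filter.mp hemem).1)
      have hadd : PySem.Set.add (g.getD a []) b = g.getD a [] ++ [b] := by
        simp only [PySem.Set.add, PySem.Set.contains]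
        rw [if_neg (by simpa using hnotrow)]
      rw [hG, hE, hadd]
      apply ih (es ++ [(a, b)]) (g.set a (g.getD a [] ++ [b]))
      · simpa using hg
      · exact hps'
      · intro e he
        rcases List.mem_append.mp he with h | h
        · exact hes e h
        · simp at h
          exact h ▸ ⟨ha, hb, hab⟩
      · intro q hq e he
        rcases List.mem_append.mp he with h | h
        · exact hfresh q (List.mem_cons_of_mem p hq) e h
        · simp at h
          subst h
          have hqp := hpwh q hq
          rintro (h' | h')
          · -- (a, b) = q
            apply hqp
            rcases hform with h'' | h''
            · exact Or.inl (h'.symm.trans h'')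
            · exact Or.inr (h'.symm.trans h'')
          · -- (a, b) = (q.2, q.1)
            apply hqp
            have hh := h'.symm
            rcases hform with h'' | h''
            · -- (q.2, q.1) = p
              have hqp2 := hh.trans h''
              have f1 := congrArg Prod.fst hqp2
              have f2 := congrArg Prod.snd hqp2
              simp at f1 f2
              exact Or.inr (Prod.ext f2 f1)
            · -- (q.2, q.1) = (p.2, p.1)
              have hqp2 := hh.trans h''
              have f1 := congrArg Prod.fst hqp2
              have f2 := congrArg Prod.snd hqp2
              simp at f1 f2
              exact Or.inl (Prod.ext f2 f1)
      · exact hpw'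
      · rw [List.nodup_append]
        refine ⟨hnd, List.nodup_singleton _, ?_⟩
        intro x hx y hy
        simp only [List.mem_singleton] at hy
        subst hy
        exact fun h => hnotin (h ▸ hx)
      · intro u
        by_cases hu : a = u
        · subst hu
          rw [pv_getD_set_self g a _ [] (by omega), hrow a, List.filter_append,
            List.map_append]
          simp
        · rw [pv_getD_set_ne g a u _ [] hu, hrow u, List.filter_append, List.map_append]
          have hne : ((a, b).1 == u) = false := by simpa using hu
          simp [hne]
    by_cases hc1 : cluster_compare (groups.getD p.1 []) (groups.getD p.2 []) rel index = 1
    · exact hcont p.1 p.2 hp1 hp2 hpne (Or.inl rfl)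
        (by simp only [pvStepG]; rw [if_pos hc1])
        (by simp only [pvStepE]; rw [if_pos hc1])
    · by_cases hcm : cluster_compare (groups.getD p.1 []) (groups.getD p.2 []) rel index = -1
      · exact hcont p.2 p.1 hp2 hp1 (fun h => hpne h.symm) (Or.inr rfl)
          (by simp only [pvStepG]; rw [if_neg hc1, if_pos hcm])
          (by simp only [pvStepE]; rw [if_neg hc1, if_pos hcm])
      · have hG : pvStepG groups rel index g p = g := by
          simp only [pvStepG]; rw [if_neg hc1, if_neg hcm]
        have hE : pvStepE groups rel index es p = es := by
          simp only [pvStepE]; rw [if_neg hc1, if_neg hcm]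
        rw [hG, hE]
        exact ih es g hg hps' hes
          (fun q hq => hfresh q (List.mem_cons_of_mem p hq)) hpw' hnd hrow

-- ---- small facts about rows of the adjacency structure ----

theorem pv_count_filter_eq (x : Nat × Nat) :
    ∀ l : List (Nat × Nat), l.Nodup →
      (l.filter (fun e => e == x)).length = if x ∈ l then 1 else 0 := by
  intro l
  induction l with
  | nil => intro _; simp
  | cons e t ih =>
    intro hnd
    rw [List.filter_cons]
    by_cases hex : e = x
    · subst hex
      have hnotin : e ∉ t := (List.nodup_cons.mp hnd).1
      simp [ih (List.Nodup.of_cons hnd), hnotin]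
    · have : (e == x) = false := by simpa using hex
      simp only [this, Bool.false_eq_true, if_false]
      rw [ih (List.Nodup.of_cons hnd)]
      have hxe : ¬(x = e) := fun h => hex h.symm
      simp [List.mem_cons, hxe]

theorem pv_mem_row_iff (edges : List (Nat × Nat)) (u i : Nat) :
    i ∈ (edges.filter (fun e => e.1 == u)).map (fun e => e.2) ↔ (u, i) ∈ edges := by
  rw [List.mem_map]
  constructor
  · rintro ⟨e, he, rfl⟩
    obtain ⟨hmem, hsrc⟩ := List.mem_filter.mp he
    have : e = (u, e.2) := Prod.ext (by simpa using hsrc) rfl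
    exact this ▸ hmem
  · intro h
    exact ⟨(u, i), List.mem_filter.mpr ⟨h, by simp⟩, rfl⟩

theorem pv_row_nodup (edges : List (Nat × Nat)) (u : Nat) (hnd : edges.Nodup) :
    ((edges.filter (fun e => e.1 == u)).map (fun e => e.2)).Nodup := by
  apply List.Nodup.map_on ?_ (hnd.filter _)
  intro x hx y hy hxy
  have hx1 : x.1 = u := by simpa using (List.mem_filter.mp hx).2
  have hy1 : y.1 = u := by simpa using (List.mem_filter.mp hy).2
  exact Prod.ext (hx1.trans hy1.symm) hxy

-- ---- the two selection loops agree, step by step ----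

theorem pv_loop_eq (groups : List (List String)) (edges : List (Nat × Nat))
    (graph : List (List Nat))
    (hG : ∀ u, graph.getD u [] = (edges.filter (fun e => e.1 == u)).map (fun e => e.2))
    (hE : ∀ e ∈ edges, e.1 < groups.length ∧ e.2 < groups.length ∧ e.1 ≠ e.2)
    (hEnd : edges.Nodup) :
    ∀ (fuel : Nat) (heap : List (String × Nat)) (emitted : List Bool) (indeg : List Int)
      (order : List Nat),
      emitted.length = groups.length → indeg.length = groups.length →
      (∀ i, i < groups.length →
        ((pvKey groups i ∈ heap) ↔ (emitted.getD i false = false ∧ indeg.getD i 0 = 0))) →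
      (∀ p ∈ heap, ∃ i, i < groups.length ∧ p = pvKey groups i) →
      heap.Nodup →
      (∀ i, i < groups.length → indeg.getD i 0 =
        ((edges.filter (fun e => e.2 == i && !emitted.getD e.1 false)).length : Int)) →
      (∀ i, i < groups.length → emitted.getD i false = true → indeg.getD i 0 = 0) →
      pvLoopA groups graph fuel heap indeg order = pvLoopB groups edges fuel emitted indeg order := by
  intro fuel
  induction fuel with
  | zero => intro heap emitted indeg order _ _ _ _ _ _ _; rfl
  | succ fuel ihf =>
    intro heap emitted indeg order hlen1 hlen2 hmem hform hnd hcount hemz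
    cases heap with
    | nil =>
      have hnone : pvScanBest groups emitted indeg groups.length = none := by
        rw [pvScanBest_eq]
        cases hscan : (List.range groups.length).foldl (pvStep groups emitted indeg) none with
        | none => rfl
        | some b =>
          exfalso
          rcases pv_scan_some_inv groups emitted indeg _ _ _ hscan with ⟨hbr, hcb⟩ | h
          · have hb : b < groups.length := List.mem_range.mp hbr
            simp only [pvCond, Bool.and_eq_true, Bool.not_eq_true', beq_iff_eq] at hcb
            exact absurd ((hmem b hb).mpr hcb) (by simp)
          · simp at h
      simp only [pvLoopA, pvLoopB, hnone]
    | cons x xs =>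
      obtain ⟨hscan, hmnkey⟩ := pv_bridge groups emitted indeg x xs hmem hform
      obtain ⟨i0, hi0, hmneq⟩ := hform _ (pvHeapMin_mem xs x)
      set mn := pvHeapMin x xs with hmndef
      set u := mn.2 with hudef
      have hui0 : u = i0 := by rw [hudef, hmneq]; rfl
      have hu : u < groups.length := hui0 ▸ hi0
      have hkmem : pvKey groups u ∈ x :: xs := by rw [← hmnkey]; exact pvHeapMin_mem xs x
      obtain ⟨hemu, hindu⟩ := (hmem u hu).mp hkmem
      set row := (edges.filter (fun e => e.1 == u)).map (fun e => e.2) with hrowdef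
      have hrowG : graph.getD u [] = row := hG u
      have hrownd : row.Nodup := pv_row_nodup edges u hEnd
      have hrowlt : ∀ v ∈ row, v < groups.length := by
        intro v hv
        exact (hE _ ((pv_mem_row_iff edges u v).mp hv)).2.1
      have hrowne : ∀ v ∈ row, v ≠ u := by
        intro v hv h
        exact (hE _ ((pv_mem_row_iff edges u v).mp hv)).2.2 (h ▸ rfl)
      have hunotrow : u ∉ row := fun h => hrowne u h rfl
      have hrowlen : ∀ v ∈ row, v < indeg.length := fun v hv => hlen2 ▸ hrowlt v hv
      -- the decremented indegree vector, common to both sides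
      set indeg' := row.foldl (fun d v => d.set v (d.getD v 0 - 1)) indeg with hind'
      have hstA := pv_stepA_fold groups row ((x :: xs).erase mn) indeg hrownd hrowlen
      -- unfold one step of each loop
      show (let st := (graph.getD u []).foldl
              (fun (st : List (String × Nat) × List Int) v =>
                let d := st.2.set v (st.2.getD v 0 - 1)
                if d.getD v 0 = 0 then (pvPush st.1 (pvKey groups v), d) else (st.1, d))
              ((x :: xs).erase mn, indeg)
            pvLoopA groups graph fuel st.1 st.2 (order ++ [u])) = _
      rw [hrowG, hstA]
      simp only []
      have hRHS : pvLoopB groups edges (fuel + 1) emitted indeg order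
          = pvLoopB groups edges fuel (emitted.set u true)
              (edges.foldl (fun d e => if e.1 = u then d.set e.2 (d.getD e.2 0 - 1) else d) indeg)
              (order ++ [u]) := by
        simp only [pvLoopB, hscan]
      rw [hRHS, pv_guardFold_filter u edges indeg, ← hrowdef, ← hind']
      -- facts about the updated state
      have hde : ∀ i, indeg'.getD i 0 = if i ∈ row then indeg.getD i 0 - 1 else indeg.getD i 0 :=
        fun i => pv_decFold_getD row indeg i hrownd hrowlen
      set emitted' := emitted.set u true with hem'
      have hemset : ∀ i, i < groups.length →
          emitted'.getD i false = if i = u then true else emitted.getD i false := by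
        intro i hi
        by_cases hiu : i = u
        · rw [if_pos hiu, hem', hiu, pv_getD_set_self emitted u _ false (hlen1 ▸ hu)]
        · rw [if_neg hiu, hem', pv_getD_set_ne emitted u i _ false (fun h => hiu h.symm)]
      have hindpos : ∀ i, i ∈ row → i < groups.length → (1 : Int) ≤ indeg.getD i 0 := by
        intro i hir hi
        have hedge : (u, i) ∈ edges := (pv_mem_row_iff edges u i).mp hir
        have hpt : (u, i) ∈ edges.filter (fun e => e.2 == i && !emitted.getD e.1 false) := by
          apply List.mem_filter.mpr
          refine ⟨hedge, ?_⟩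
          have h1 : (((u, i).2 : Nat) == i) = true := by simp
          have h2 : emitted.getD (u, i).1 false = false := hemu
          rw [h1, h2]
          rfl
        have hpos : 0 < (edges.filter (fun e => e.2 == i && !emitted.getD e.1 false)).length :=
          List.length_pos_of_mem hpt
        rw [hcount i hi]
        exact_mod_cast hpos
      -- the new indegree count invariant
      have hcount' : ∀ i, i < groups.length → indeg'.getD i 0 =
          ((edges.filter (fun e => e.2 == i && !emitted'.getD e.1 false)).length : Int) := by
        intro i hi
        have hsplit : (edges.filter (fun e => e.2 == i && !emitted.getD e.1 false)).length
            = (edges.filter (fun e => e.2 == i && !emitted'.getD e.1 false)).length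
              + (edges.filter (fun e => e == (u, i))).length := by
          apply pv_filterLen_split
          intro e he
          have he1 : e.1 < groups.length := (hE e he).1
          rcases e with ⟨e1, e2⟩
          by_cases heu : e1 = u
          · have hbq : ((((e1, e2) : Nat × Nat)) == (u, i)) = (e2 == i) := by
              simp [heu]
            have hold : emitted.getD (e1, e2).1 false = false := by
              simpa [heu] using hemu
            have hnewv : emitted'.getD (e1, e2).1 false = true := by
              rw [show ((e1, e2).1 : Nat) = u from heu, hemset u hu, if_pos rfl]
            rw [hbq, hold, hnewv]
            cases (e2 == i) <;> simp
          · have hbq : ((((e1, e2) : Nat × Nat)) == (u, i)) = false := by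
              simp [heu]
            have hnewv : emitted'.getD (e1, e2).1 false = emitted.getD (e1, e2).1 false := by
              rw [hemset e1 he1, if_neg heu]
            rw [hbq, hnewv]
            cases (e2 == i) <;> cases (emitted.getD (e1, e2).1 false) <;> simp
        have hone : (edges.filter (fun e => e == (u, i))).length
            = if (u, i) ∈ edges then 1 else 0 := pv_count_filter_eq (u, i) edges hEnd
        rw [hde i]
        by_cases hir : i ∈ row
        · have : (u, i) ∈ edges := (pv_mem_row_iff edges u i).mp hir
          rw [if_pos hir, hcount i hi, hsplit, hone, if_pos this]
          push_cast
          ring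
        · have : (u, i) ∉ edges := fun h => hir ((pv_mem_row_iff edges u i).mpr h)
          rw [if_neg hir, hcount i hi, hsplit, hone, if_neg this]
          push_cast
          ring
      -- nobody emitted has positive indegree afterwards
      have hemz' : ∀ i, i < groups.length → emitted'.getD i false = true → indeg'.getD i 0 = 0 := by
        intro i hi hei
        by_cases hiu : i = u
        · rw [hiu, hde u, if_neg hunotrow]
          exact hindu
        · rw [hemset i hi, if_neg hiu] at hei
          have hz := hemz i hi hei
          have hnotrow : i ∉ row := by
            intro hir
            have := hindpos i hir hi
            omega
          rw [hde i, if_neg hnotrow]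
          exact hz
      -- the heap after the step mirrors the new candidate set
      have hpushmem : ∀ i, (pvKey groups i ∈ (row.filter (fun v => indeg.getD v 0 == 1)).map (pvKey groups))
          ↔ (i ∈ row ∧ indeg.getD i 0 = 1) := by
        intro i
        rw [List.mem_map]
        constructor
        · rintro ⟨v, hv, hkey⟩
          obtain rfl := pvKey_inj groups hkey.symm
          obtain ⟨h1, h2⟩ := List.mem_filter.mp hv
          exact ⟨h1, by simpa using h2⟩
        · rintro ⟨h1, h2⟩
          exact ⟨i, List.mem_filter.mpr ⟨h1, by simpa using h2⟩, rfl⟩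
      have hmem' : ∀ i, i < groups.length →
          ((pvKey groups i ∈ (x :: xs).erase mn ++ (row.filter (fun v => indeg.getD v 0 == 1)).map (pvKey groups))
            ↔ (emitted'.getD i false = false ∧ indeg'.getD i 0 = 0)) := by
        intro i hi
        rw [List.mem_append, hpushmem i, hemset i hi, hde i]
        by_cases hiu : i = u
        · have hnoterase : pvKey groups u ∉ (x :: xs).erase mn := by
            intro h
            exact ((hnd.mem_erase_iff).mp h).1 hmnkey.symm
          rw [hiu]
          simp [hnoterase, hunotrow]
        · have herase : pvKey groups i ∈ (x :: xs).erase mn ↔ pvKey groups i ∈ x :: xs := by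
            rw [hnd.mem_erase_iff]
            constructor
            · exact fun h => h.2
            · intro h
              refine ⟨?_, h⟩
              rw [hmnkey]
              exact fun hk => hiu (pvKey_inj groups (hk ▸ rfl))
          rw [herase, hmem i hi, if_neg hiu]
          by_cases hir : i ∈ row
          · have hpos := hindpos i hir hi
            constructor
            · rintro (⟨he, hz⟩ | ⟨_, hone⟩)
              · omega
              · refine ⟨?_, by rw [if_pos hir]; omega⟩
                cases hemi : emitted.getD i false
                · rfl
                · have := hemz i hi hemi; omega
            · rintro ⟨he, hz⟩
              rw [if_pos hir] at hz
              exact Or.inr ⟨hir, by omega⟩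
          · rw [if_neg hir]
            constructor
            · rintro (h | ⟨hcontra, _⟩)
              · exact h
              · exact absurd hcontra hir
            · exact fun h => Or.inl h
      -- well-formedness of the new heap
      have hform' : ∀ p ∈ (x :: xs).erase mn ++ (row.filter (fun v => indeg.getD v 0 == 1)).map (pvKey groups),
          ∃ i, i < groups.length ∧ p = pvKey groups i := by
        intro p hp
        rcases List.mem_append.mp hp with h | h
        · exact hform p (List.mem_of_mem_erase h)
        · obtain ⟨v, hv, rfl⟩ := List.mem_map.mp h
          exact ⟨v, hrowlt v (List.mem_filter.mp hv).1, rfl⟩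
      have hnd' : ((x :: xs).erase mn ++ (row.filter (fun v => indeg.getD v 0 == 1)).map (pvKey groups)).Nodup := by
        rw [List.nodup_append]
        refine ⟨hnd.erase mn, ((hrownd.filter _).map (pvKey_inj groups)), ?_⟩
        intro p hp q hq
        obtain ⟨v, hv, rfl⟩ := List.mem_map.mp hq
        obtain ⟨hvrow, hvone⟩ := List.mem_filter.mp hv
        intro hpq
        subst hpq
        have hpheap := List.mem_of_mem_erase hp
        have hvm : v < groups.length := hrowlt v hvrow
        obtain ⟨_, hz⟩ := (hmem v hvm).mp hpheap
        have : indeg.getD v 0 = 1 := by simpa using hvone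
        omega
      exact ihf _ _ _ _
        (by rw [hem']; simp [hlen1])
        (by rw [hind']
            exact (pv_foldl_set_length (fun d v => d.getD v 0 - 1) row (fun v => v) indeg).trans hlen2)
        hmem' hform' hnd' hcount' hemz'

-- ---- assembling the two ports ----

-- the common tail of both ports: cycle fallback and index-to-cluster mapping
def pvFinish (groups : List (List String)) (order : List Nat) : List (List String) :=
  (if order.length ≠ groups.length
   then PySem.List.sorted (List.range groups.length) (fun i => (groups.getD i []).headD "") false
   else order).map (fun i => groups.getD i [])

theorem pv_getD_replicate {α : Type} (m j : Nat) (a : α) :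
    (List.replicate m a).getD j a = a := by
  rw [List.getD_eq_getElem?_getD, List.getElem?_replicate]
  split <;> rfl

theorem pv_nestedInc_length (row : Nat → List Nat) :
    ∀ (us : List Nat) (d : List Int),
      (us.foldl (fun d u => (row u).foldl (fun d v => d.set v (d.getD v 0 + 1)) d) d).length
        = d.length := by
  intro us
  induction us with
  | nil => intro d; rfl
  | cons u t ih =>
    intro d
    rw [List.foldl_cons, ih]
    exact pv_foldl_set_length (fun d v => d.getD v 0 + 1) (row u) (fun v => v) d

theorem pv_ports_eq (groups : List (List String)) (rel : List (List Int))
    (index : List (String × Int)) :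
    topo_sort_clusters groups rel index = topo_sort_clusters_alt groups rel index := by
  set m := groups.length with hm
  set gr : List (List Nat) :=
    (List.range m).foldl (fun g i =>
      ((List.range m).drop (i + 1)).foldl (fun g j =>
        let c := cluster_compare (groups.getD i []) (groups.getD j []) rel index
        if c = 1 then g.set i (PySem.Set.add (g.getD i []) j)
        else if c = -1 then g.set j (PySem.Set.add (g.getD j []) i)
        else g) g)
      (List.replicate m ([] : List Nat)) with hgrdef
  set es : List (Nat × Nat) :=
    (List.range m).foldl (fun es i =>
      ((List.range m).drop (i + 1)).foldl (fun es j =>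
        let c := cluster_compare (groups.getD i []) (groups.getD j []) rel index
        if c = 1 then es ++ [(i, j)]
        else if c = -1 then es ++ [(j, i)]
        else es) es) [] with hesdef
  have hgr2 : gr = (pvPairs m).foldl (pvStepG groups rel index) (List.replicate m []) := by
    rw [hgrdef]; exact pv_graph_conv groups rel index m _
  have hes2 : es = (pvPairs m).foldl (pvStepE groups rel index) [] := by
    rw [hesdef]; exact pv_edges_conv groups rel index m _
  obtain ⟨hlenG, hEprops, hEnodup, hrows⟩ :
      gr.length = m ∧
      (∀ e ∈ es, e.1 < m ∧ e.2 < m ∧ e.1 ≠ e.2) ∧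
      es.Nodup ∧
      (∀ u, gr.getD u [] = (es.filter (fun e => e.1 == u)).map (fun e => e.2)) := by
    rw [hgr2, hes2]
    apply pv_build_sync groups rel index m (pvPairs m) [] (List.replicate m [])
    · simp
    · intro p hp
      have := pv_pairs_mem hp
      exact ⟨by omega, this.2, by omega⟩
    · intro e he; simp at he
    · intro p _ e he; simp at he
    · exact pv_pairs_pairwise m
    · exact List.nodup_nil
    · intro u; simp
  set indegA : List Int :=
    (List.range m).foldl (fun d u =>
      (gr.getD u []).foldl (fun d v => d.set v (d.getD v 0 + 1)) d)
      (List.replicate m (0 : Int)) with hindegA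
  set indegB : List Int :=
    es.foldl (fun d e => d.set e.2 (d.getD e.2 0 + 1)) (List.replicate m (0 : Int)) with hindegB
  have hlenA : indegA.length = m := by
    rw [hindegA]
    rw [pv_nestedInc_length (fun u => gr.getD u []) (List.range m) (List.replicate m 0)]
    simp
  have hlenB : indegB.length = m := by
    rw [hindegB]
    have := pv_foldl_set_length (fun (d : List Int) (e : Nat × Nat) => d.getD e.2 0 + 1) es
      (fun e => e.2) (List.replicate m 0)
    rw [this]
    simp
  have hgetA : ∀ i, indegA.getD i 0 = ((es.filter (fun e => e.2 == i)).length : Int) := by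
    intro i
    rw [hindegA, pv_nestedInc_getD (fun u => gr.getD u []) (List.range m) (List.replicate m 0) i
      (by
        intro u _ v hv
        rw [List.length_replicate]
        beta_reduce at hv
        rw [hrows u] at hv
        exact (hEprops _ ((pv_mem_row_iff es u v).mp hv)).2.1)]
    rw [pv_getD_replicate]
    have hcongr : (List.range m).map
        (fun u => (((fun u => gr.getD u []) u).filter (fun v => v == i)).length)
        = (List.range m).map
          (fun u => ((((es.filter (fun e => e.1 == u)).map (fun e => e.2)).filter (fun v => v == i)).length)) := by
      apply List.map_congr_left
      intro u _
      beta_reduce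
      rw [hrows u]
    rw [hcongr, pv_sum_rows_filter m i es (fun e he => (hEprops e he).1)]
    omega
  have hgetB : ∀ i, indegB.getD i 0 = ((es.filter (fun e => e.2 == i)).length : Int) := by
    intro i
    rw [hindegB, pv_edgeIncFold_getD es (List.replicate m 0) i
      (by intro e he; rw [List.length_replicate]; exact (hEprops e he).2.1)]
    rw [pv_getD_replicate]
    omega
  have hind_eq : indegA = indegB := by
    apply List.ext_getElem (by rw [hlenA, hlenB])
    intro n h1 h2
    have h := (hgetA n).trans (hgetB n).symm
    rwa [List.getD_eq_getElem indegA 0 h1, List.getD_eq_getElem indegB 0 h2] at h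
  set heapA : List (String × Nat) :=
    (List.range m).foldl (fun h i => if indegA.getD i 0 == 0 then pvPush h (pvKey groups i) else h)
      [] with hheapA
  have hheap : heapA = ((List.range m).filter (fun i => indegA.getD i 0 == 0)).map (pvKey groups) := by
    rw [hheapA]
    simp only [pvPush]
    rw [PySem.List.foldl_append_if]
    simp
  have hrepl : ∀ j, (List.replicate m false).getD j false = false := by
    intro j
    exact pv_getD_replicate m j false
  have hmem0 : ∀ i, i < m → ((pvKey groups i ∈ heapA) ↔
      ((List.replicate m false).getD i false = false ∧ indegA.getD i 0 = 0)) := by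
    intro i hi
    rw [hheap, hrepl i]
    constructor
    · intro h
      obtain ⟨j, hj, hkey⟩ := List.mem_map.mp h
      obtain rfl := pvKey_inj groups hkey
      have := (List.mem_filter.mp hj).2
      exact ⟨rfl, by simpa using this⟩
    · rintro ⟨_, hz⟩
      exact List.mem_map.mpr ⟨i, List.mem_filter.mpr ⟨List.mem_range.mpr hi, by simpa using hz⟩, rfl⟩
  have hform0 : ∀ p ∈ heapA, ∃ i, i < m ∧ p = pvKey groups i := by
    intro p hp
    rw [hheap] at hp
    obtain ⟨j, hj, rfl⟩ := List.mem_map.mp hp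
    exact ⟨j, List.mem_range.mp (List.mem_filter.mp hj).1, rfl⟩
  have hnd0 : heapA.Nodup := by
    rw [hheap]
    exact ((List.nodup_range).filter _).map (pvKey_inj groups)
  have hcount0 : ∀ i, i < m → indegA.getD i 0 =
      ((es.filter (fun e => e.2 == i && !(List.replicate m false).getD e.1 false)).length : Int) := by
    intro i _
    rw [hgetA i]
    congr 2
    apply List.filter_congr
    intro e _
    rw [hrepl e.1]
    simp
  have hemz0 : ∀ i, i < m → (List.replicate m false).getD i false = true → indegA.getD i 0 = 0 := by
    intro i _ h
    rw [hrepl i] at h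
    exact absurd h (by simp)
  have horder : pvLoopA groups gr (m + 1) heapA indegA []
      = pvLoopB groups es (m + 1) (List.replicate m false) indegA [] :=
    pv_loop_eq groups es gr hrows hEprops hEnodup (m + 1) heapA (List.replicate m false) indegA []
      (by simpa using hm) hlenA hmem0 hform0 hnd0 hcount0 hemz0
  rw [hind_eq] at horder
  have hA : topo_sort_clusters groups rel index
      = pvFinish groups (pvLoopA groups gr (m + 1) heapA indegA []) := rfl
  have hB : topo_sort_clusters_alt groups rel index
      = pvFinish groups (pvLoopB groups es (m + 1) (List.replicate m false) indegB []) := rfl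
  rw [hA, hB, hind_eq, horder]

-- ===== VERDICT (by name: the statement is the Claim_ definition above) =====
theorem topo_sort_clusters_spec : Claim_equal_topo_sort_clusters := by
  intro groups rel index _ _
  show topo_sort_clusters groups rel index = topo_sort_clusters_alt groups rel index
  exact pv_ports_eq groups rel index
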